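-- pv_equiv track=rewrite | github.com/sashaprovorova/CMPSC131-132 | finalproject.py | nicenum
-- ===== SOURCE A (Python) =====
-- def nicenum(num3):
--
--     num3=int(num3)
--     isnicenum=False
--     previous=0
--     down=0
--     up=0
--     upinupdown=0
--     downinupdown=0
--     countnum=0
--     lst=[]
--
--     while num3>0:
--         digit=num3%10
--         countnum+=1
--         if num3//10!=0:
--             previous=(num3%100)//10
--         elif num3//10==0:
--             previous=digit
--
--         if digit >= previous:
--             up+=1
--             if digit != previous:
--                 lst.append(1)
--         if digit <= previous:
--             down+=1
--             if digit != previous: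
--                 lst.append(0)
--         num3=num3//10
--
--     for j in range (1,len(lst)):
--         if lst[j] > lst[j-1]:
--             upinupdown+=1
--         if lst[j] < lst[j-1]:
--             downinupdown+=1
--
--     if up==countnum or down==countnum or (downinupdown==0 and upinupdown!=0):
--         isnicenum=True
--
--     return(isnicenum)
-- ===== SOURCE B (Python) =====
-- def nicenum(num3):
--     # A number is "nice" iff its digit list splits into a non-decreasing prefix
--     # followed by a non-increasing suffix (checked on the LSB-first digit list;
--     # the property is symmetric under reversal).
--     num3 = int(num3)
--     digits = []
--     n = num3
--     while n > 0:
--         digits.append(n % 10)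
--         n //= 10
--
--     def nondec(xs):
--         return all(a <= b for a, b in zip(xs, xs[1:]))
--
--     def noninc(xs):
--         return all(b <= a for a, b in zip(xs, xs[1:]))
--
--     return any(nondec(digits[:i]) and noninc(digits[i:]) for i in range(len(digits) + 1))
-- ===== Notes on version B (the rewrite author's own statement) =====
-- stated objective: alternative
-- what changed: A classifies each adjacent digit pair on the fly into six running counters plus an appended 0/1 marker list and then rescans that list by index for direction transitions; B instead decides niceness by its global shape characterization - it enumerates every split point of the digit list and accepts iff some split yields a non-decreasing prefix and a non-increasing suffix.
import Mathlib
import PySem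

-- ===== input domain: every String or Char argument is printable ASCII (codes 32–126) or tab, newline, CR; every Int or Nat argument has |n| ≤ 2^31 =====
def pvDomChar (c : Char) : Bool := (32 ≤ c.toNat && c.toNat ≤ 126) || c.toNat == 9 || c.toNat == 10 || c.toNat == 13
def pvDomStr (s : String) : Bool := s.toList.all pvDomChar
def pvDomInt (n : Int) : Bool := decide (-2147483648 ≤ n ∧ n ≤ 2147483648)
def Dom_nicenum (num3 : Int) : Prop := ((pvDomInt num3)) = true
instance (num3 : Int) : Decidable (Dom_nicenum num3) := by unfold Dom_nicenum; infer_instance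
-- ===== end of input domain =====

-- B replaces A's six-counter direction bookkeeping and marker-list rescan by a global
-- shape test: some split of the digit list gives a non-decreasing prefix followed by a
-- non-increasing suffix (objective: alternative algorithm; not faster).

-- ===== PORT A =====
-- the while-loop of A: state (previous, down, up, countnum, lst)
def nicenumLoopA (num3 previous down up countnum : Int) (lst : List Int) :
    Int × Int × Int × Int × List Int :=
  if h : 0 < num3 then
    let digit := PySem.Int.mod num3 10
    let countnum1 := countnum + 1
    let previous1 := if PySem.Int.floordiv num3 10 ≠ 0 then
        PySem.Int.floordiv (PySem.Int.mod num3 100) 10 else digit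
    let up1 := if previous1 ≤ digit then up + 1 else up
    let lst1 := if previous1 ≤ digit then (if digit ≠ previous1 then lst ++ [(1:Int)] else lst) else lst
    let down1 := if digit ≤ previous1 then down + 1 else down
    let lst2 := if digit ≤ previous1 then (if digit ≠ previous1 then lst1 ++ [(0:Int)] else lst1) else lst1
    nicenumLoopA (PySem.Int.floordiv num3 10) previous1 down1 up1 countnum1 lst2
  else (previous, down, up, countnum, lst)
termination_by num3.toNat
decreasing_by
  rw [PySem.Int.floordiv_eq_ediv_of_pos (by norm_num)]; omega

-- int(num3) is the identity on an int argument
def nicenum (num3 : Int) : Bool :=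
  let r := nicenumLoopA num3 0 0 0 0 []
  let down := r.2.1
  let up := r.2.2.1
  let countnum := r.2.2.2.1
  let lst := r.2.2.2.2
  let t := (PySem.List.pyRange 1 (PySem.List.len lst) 1).foldl
      (fun (p : Int × Int) j =>
        (if PySem.List.pyGetD lst (j-1) 0 < PySem.List.pyGetD lst j 0 then p.1 + 1 else p.1,
         if PySem.List.pyGetD lst j 0 < PySem.List.pyGetD lst (j-1) 0 then p.2 + 1 else p.2))
      (0, 0)
  if up = countnum ∨ down = countnum ∨ (t.2 = 0 ∧ t.1 ≠ 0) then true else false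

-- ===== PORT B =====
-- the digit-collecting while-loop of B (least-significant first)
def digitsLoopB (n : Int) (digits : List Int) : List Int :=
  if h : 0 < n then digitsLoopB (PySem.Int.floordiv n 10) (digits ++ [PySem.Int.mod n 10])
  else digits
termination_by n.toNat
decreasing_by
  rw [PySem.Int.floordiv_eq_ediv_of_pos (by norm_num)]; omega

-- all(a <= b over xs zipped with its tail slice)
def nondecB (xs : List Int) : Bool :=
  (xs.zip (PySem.List.slice xs (some 1) none)).all (fun p => decide (p.1 ≤ p.2))

-- all(b <= a over xs zipped with its tail slice)
def nonincB (xs : List Int) : Bool :=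
  (xs.zip (PySem.List.slice xs (some 1) none)).all (fun p => decide (p.2 ≤ p.1))

-- int(num3) is the identity on an int argument
def nicenum_alt (num3 : Int) : Bool :=
  let digits := digitsLoopB num3 []
  (PySem.List.pyRange 0 ((digits.length : Int) + 1) 1).any (fun i =>
    nondecB (PySem.List.slice digits none (some i)) &&
    nonincB (PySem.List.slice digits (some i) none))

-- ===== PRECONDITION & SPEC =====
def Spec_nicenum (num3 : Int) (out : Bool) : Prop := out = nicenum_alt num3
instance (num3 : Int) (out : Bool) : Decidable (Spec_nicenum num3 out) := by unfold Spec_nicenum; infer_instance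

-- ===== CLAIM (what is proved, stated in full; the proofs are below) =====
def Claim_equal_nicenum : Prop := ∀ (num3 : Int), Dom_nicenum num3 → Spec_nicenum num3 (nicenum num3)

-- ===== LEMMAS AND PROOFS =====

-- the list of digits of n, least significant first (empty for n ≤ 0)
def lsbDigits (n : Int) : List Int :=
  if h : 0 < n then PySem.Int.mod n 10 :: lsbDigits (PySem.Int.floordiv n 10) else []
termination_by n.toNat
decreasing_by
  rw [PySem.Int.floordiv_eq_ediv_of_pos (by norm_num)]; omega

-- adjacent pairs of a list
def pairsOf (xs : List Int) : List (Int × Int) := xs.zip xs.tail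

-- the 0/1 entry A's loop appends for one adjacent digit pair
def mk1 (p : Int × Int) : List Int :=
  if p.2 < p.1 then [1] else if p.1 < p.2 then [0] else []

-- the whole lst A's loop builds, as a function of the LSB-first digit list
def mkLst (ds : List Int) : List Int := (pairsOf ds).flatMap mk1

def cGe (ds : List Int) : Int := ((pairsOf ds).countP (fun p => decide (p.2 ≤ p.1)) : Int)
def cLe (ds : List Int) : Int := ((pairsOf ds).countP (fun p => decide (p.1 ≤ p.2)) : Int)

lemma lsb_cons (n : Int) (hn : 0 < n) :
    lsbDigits n = PySem.Int.mod n 10 :: lsbDigits (PySem.Int.floordiv n 10) := by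
  rw [lsbDigits, dif_pos hn]

lemma lsb_nil (n : Int) (hn : ¬ 0 < n) : lsbDigits n = [] := by
  rw [lsbDigits, dif_neg hn]

lemma pairs_cons₂ (a b : Int) (t : List Int) :
    pairsOf (a :: b :: t) = (a, b) :: pairsOf (b :: t) := by
  simp [pairsOf]

lemma prev_digit (n : Int) (hn : 0 < n) :
    PySem.Int.floordiv (PySem.Int.mod n 100) 10 = PySem.Int.mod (PySem.Int.floordiv n 10) 10 := by
  rw [PySem.Int.floordiv_eq_ediv_of_pos (by norm_num), PySem.Int.floordiv_eq_ediv_of_pos (by norm_num),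
      PySem.Int.mod_eq_emod_of_pos (by norm_num), PySem.Int.mod_eq_emod_of_pos (by norm_num)]
  omega

lemma length_pairsOf (xs : List Int) : (pairsOf xs).length = xs.length - 1 := by
  simp [pairsOf]

-- A's loop, characterised by the digit list
theorem loopA_spec (n prev down up cnt : Int) (lst : List Int) (hn : 0 < n) :
    ∃ p', nicenumLoopA n prev down up cnt lst =
      (p', down + cLe (lsbDigits n) + 1, up + cGe (lsbDigits n) + 1,
       cnt + ((lsbDigits n).length : Int), lst ++ mkLst (lsbDigits n)) := by
  have hmn : 0 ≤ PySem.Int.floordiv n 10 ∧ PySem.Int.floordiv n 10 < n := by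
    rw [PySem.Int.floordiv_eq_ediv_of_pos (by norm_num)]; omega
  rw [nicenumLoopA, dif_pos hn]
  simp only []
  by_cases hm : PySem.Int.floordiv n 10 = 0
  · refine ⟨PySem.Int.mod n 10, ?_⟩
    rw [lsb_cons n hn, hm, lsb_nil 0 (by omega)]
    rw [if_neg (not_not_intro rfl)]
    rw [if_pos le_rfl, if_pos le_rfl, if_neg (not_not_intro rfl), if_neg (not_not_intro rfl)]
    rw [nicenumLoopA, dif_neg (by omega)]
    simp [cLe, cGe, pairsOf, mkLst]
  · have hm' : 0 < PySem.Int.floordiv n 10 := by omega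
    rw [if_pos hm, prev_digit n hn]
    set m := PySem.Int.floordiv n 10 with hmdef
    set d := PySem.Int.mod n 10 with hd
    set e := PySem.Int.mod m 10 with he
    obtain ⟨p', ih⟩ := loopA_spec m e
      (if d ≤ e then down + 1 else down)
      (if e ≤ d then up + 1 else up)
      (cnt + 1)
      (if d ≤ e then (if d ≠ e then (if e ≤ d then (if d ≠ e then lst ++ [(1:Int)] else lst) else lst) ++ [(0:Int)] else (if e ≤ d then (if d ≠ e then lst ++ [(1:Int)] else lst) else lst)) else (if e ≤ d then (if d ≠ e then lst ++ [(1:Int)] else lst) else lst))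
      hm'
    refine ⟨p', ?_⟩
    rw [ih]
    have hds : lsbDigits n = d :: lsbDigits m := lsb_cons n hn
    have hm2 : lsbDigits m = e :: lsbDigits (PySem.Int.floordiv m 10) := lsb_cons m hm'
    have hpc : pairsOf (lsbDigits n) = (d, e) :: pairsOf (lsbDigits m) := by
      rw [hds, hm2, pairs_cons₂, ← hm2]
    have hmk : mkLst (lsbDigits n) = mk1 (d, e) ++ mkLst (lsbDigits m) := by
      rw [mkLst, hpc, List.flatMap_cons, mkLst]
    have hcle : cLe (lsbDigits n) = (if d ≤ e then 1 else 0) + cLe (lsbDigits m) := by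
      rw [cLe, hpc, List.countP_cons, cLe]
      simp only [decide_eq_true_eq]
      split_ifs with h <;> push_cast <;> omega
    have hcge : cGe (lsbDigits n) = (if e ≤ d then 1 else 0) + cGe (lsbDigits m) := by
      rw [cGe, hpc, List.countP_cons, cGe]
      simp only [decide_eq_true_eq]
      split_ifs with h <;> push_cast <;> omega
    have hlen : ((lsbDigits n).length : Int) = ((lsbDigits m).length : Int) + 1 := by
      rw [hds]; push_cast [List.length_cons]; ring
    have hmk1 : (if d ≤ e then (if d ≠ e then (if e ≤ d then (if d ≠ e then lst ++ [(1:Int)] else lst) else lst) ++ [(0:Int)] else (if e ≤ d then (if d ≠ e then lst ++ [(1:Int)] else lst) else lst)) else (if e ≤ d then (if d ≠ e then lst ++ [(1:Int)] else lst) else lst)) = lst ++ mk1 (d, e) := by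
      rcases lt_trichotomy d e with h | h | h
      · rw [if_pos h.le, if_pos h.ne, if_neg (not_le.mpr h),
            show mk1 (d, e) = [0] from by simp [mk1, not_lt.mpr h.le, h]]
      · rw [if_pos h.le, if_neg (not_not_intro h), if_pos h.ge, if_neg (not_not_intro h),
            show mk1 (d, e) = [] from by simp [mk1, h]]
        simp
      · rw [if_neg (not_le.mpr h), if_pos h.le, if_pos h.ne',
            show mk1 (d, e) = [1] from by simp [mk1, h]]
    rw [hmk, hcle, hcge, hlen, hmk1]
    simp only [Prod.mk.injEq]
    refine ⟨by trivial, ?_, ?_, ?_, ?_⟩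
    · split_ifs <;> omega
    · split_ifs <;> omega
    · omega
    · rw [List.append_assoc]
termination_by n.toNat
decreasing_by
  rw [PySem.Int.floordiv_eq_ediv_of_pos (by norm_num)]; omega

-- B's digit loop builds the same digit list
theorem digitsLoopB_eq (n : Int) (acc : List Int) :
    digitsLoopB n acc = acc ++ lsbDigits n := by
  by_cases hn : 0 < n
  · rw [digitsLoopB, dif_pos hn, digitsLoopB_eq, lsb_cons n hn]
    simp
  · rw [digitsLoopB, dif_neg hn, lsb_nil n hn, List.append_nil]
termination_by n.toNat
decreasing_by
  rw [PySem.Int.floordiv_eq_ediv_of_pos (by norm_num)]; omega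

-- the index-based transition loop of A, characterised by adjacent pairs of lst
theorem trans_fold (lst : List Int) (k a b : Int) (hk : 1 ≤ k) :
    (PySem.List.pyRange k (lst.length : Int) 1).foldl
      (fun (p : Int × Int) j =>
        (if PySem.List.pyGetD lst (j-1) 0 < PySem.List.pyGetD lst j 0 then p.1 + 1 else p.1,
         if PySem.List.pyGetD lst j 0 < PySem.List.pyGetD lst (j-1) 0 then p.2 + 1 else p.2))
      (a, b)
    = (a + (((pairsOf lst).drop (k.toNat - 1)).countP (fun p => decide (p.1 < p.2)) : Int),
       b + (((pairsOf lst).drop (k.toNat - 1)).countP (fun p => decide (p.2 < p.1)) : Int)) := by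
  by_cases h : k < (lst.length : Int)
  · rw [PySem.List.pyRange_one_cons h, List.foldl_cons]
    have hkk : k.toNat < lst.length := by omega
    have h1 : PySem.List.pyGetD lst k 0 = lst[k.toNat]'(by omega) :=
      PySem.List.pyGetD_eq_getElem lst 0 (by omega) (by exact_mod_cast h)
    have h2 : PySem.List.pyGetD lst (k-1) 0 = lst[k.toNat - 1]'(by omega) := by
      rw [PySem.List.pyGetD_eq_getElem lst 0 (by omega) (by push_cast; omega)]
      congr 1
      omega
    have hdrop : (pairsOf lst).drop (k.toNat - 1) =
        (lst[k.toNat - 1]'(by omega), lst[k.toNat]'(by omega)) :: (pairsOf lst).drop ((k+1).toNat - 1) := by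
      have hlt : k.toNat - 1 < (pairsOf lst).length := by rw [length_pairsOf]; omega
      rw [List.drop_eq_getElem_cons hlt]
      congr 1
      · simp only [pairsOf, List.getElem_zip, List.getElem_tail]
        congr 2
        omega
      · congr 1
        omega
    rw [trans_fold lst (k+1) _ _ (by omega), hdrop, List.countP_cons, List.countP_cons, h1, h2]
    dsimp only
    simp only [Prod.mk.injEq, decide_eq_true_eq]
    constructor <;> (split_ifs <;> push_cast <;> omega)
  · rw [PySem.List.pyRange_one_eq_nil (by omega), List.foldl_nil]
    have : (pairsOf lst).drop (k.toNat - 1) = [] := by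
      apply List.drop_eq_nil_of_le
      rw [length_pairsOf]; omega
    rw [this]
    simp
termination_by (lst.length - k.toNat)
decreasing_by omega

-- entries of mk1 / flatMap mk1 are 0 or 1
lemma mem_mk1 (p : Int × Int) (x : Int) (hx : x ∈ mk1 p) : x = 0 ∨ x = 1 := by
  unfold mk1 at hx
  split_ifs at hx <;> simp_all

lemma flat_h01 (l : List (Int × Int)) : ∀ x ∈ l.flatMap mk1, x = 0 ∨ x = 1 := by
  intro x hx
  rw [List.mem_flatMap] at hx
  obtain ⟨p, _, hp⟩ := hx
  exact mem_mk1 p x hp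

lemma zero_mem_flat (l : List (Int × Int)) : (0:Int) ∈ l.flatMap mk1 ↔ ∃ p ∈ l, p.1 < p.2 := by
  rw [List.mem_flatMap]
  constructor
  · rintro ⟨p, hp, hm⟩
    refine ⟨p, hp, ?_⟩
    unfold mk1 at hm; split_ifs at hm <;> simp_all
  · rintro ⟨p, hp, hm⟩
    exact ⟨p, hp, by unfold mk1; rw [if_neg (by omega), if_pos hm]; simp⟩

lemma one_mem_flat (l : List (Int × Int)) : (1:Int) ∈ l.flatMap mk1 ↔ ∃ p ∈ l, p.2 < p.1 := by
  rw [List.mem_flatMap]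
  constructor
  · rintro ⟨p, hp, hm⟩
    refine ⟨p, hp, ?_⟩
    unfold mk1 at hm; split_ifs at hm <;> simp_all
  · rintro ⟨p, hp, hm⟩
    exact ⟨p, hp, by unfold mk1; rw [if_pos hm]; simp⟩

lemma one_mem_mk1 (p : Int × Int) : (1:Int) ∈ mk1 p ↔ p.2 < p.1 := by
  unfold mk1; split_ifs with h1 h2 <;> simp_all

lemma mem_pairsOf (xs : List Int) (q : Int × Int) :
    q ∈ pairsOf xs ↔ ∃ i, ∃ h : i + 1 < xs.length, q = (xs[i], xs[i+1]) := by
  rw [pairsOf, List.mem_iff_getElem]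
  constructor
  · rintro ⟨i, hi, hq⟩
    have hi' : i + 1 < xs.length := by simp at hi; omega
    refine ⟨i, hi', ?_⟩
    rw [← hq, List.getElem_zip, List.getElem_tail]
  · rintro ⟨i, hi, hq⟩
    refine ⟨i, by simp; omega, ?_⟩
    rw [List.getElem_zip, List.getElem_tail, hq]

lemma pairsOf_getElem (xs : List Int) (i : Nat) (hi : i < (pairsOf xs).length) :
    (pairsOf xs)[i] = (xs[i]'(by rw [length_pairsOf] at hi; omega),
                       xs[i+1]'(by rw [length_pairsOf] at hi; omega)) := by
  simp only [pairsOf, List.getElem_zip, List.getElem_tail]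

-- mixed sorted 0/1 list has an adjacent strict rise
lemma exists_up (lst : List Int) (h01 : ∀ x ∈ lst, x = 0 ∨ x = 1)
    (hpw : lst.Pairwise (fun a b => a ≤ b)) (h0 : (0:Int) ∈ lst) (h1 : (1:Int) ∈ lst) :
    ∃ q ∈ pairsOf lst, q.1 < q.2 := by
  induction lst with
  | nil => simp at h0
  | cons x t ih =>
    rw [List.pairwise_cons] at hpw
    rcases h01 x List.mem_cons_self with hx | hx
    · -- x = 0
      by_cases h0t : (0:Int) ∈ t
      · have h1t : (1:Int) ∈ t := by
          rcases List.mem_cons.mp h1 with h | h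
          · omega
          · exact h
        obtain ⟨q, hq, hlt⟩ := ih (fun z hz => h01 z (List.mem_cons_of_mem _ hz)) hpw.2 h0t h1t
        rcases t with _ | ⟨y, t'⟩
        · simp at h0t
        · exact ⟨q, by rw [pairs_cons₂]; exact List.mem_cons_of_mem _ hq, hlt⟩
      · have h1t : (1:Int) ∈ t := by
          rcases List.mem_cons.mp h1 with h | h
          · omega
          · exact h
        rcases t with _ | ⟨y, t'⟩
        · simp at h1t
        · have hy : y = 1 := by
            rcases h01 y (by simp) with h | h
            · exfalso; apply h0t; rw [h]; exact List.mem_cons_self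
            · exact h
          exact ⟨(x, y), by rw [pairs_cons₂]; exact List.mem_cons_self, by omega⟩
    · -- x = 1: everything in t is 1, contradicting 0 ∈ x :: t
      exfalso
      rcases List.mem_cons.mp h0 with h | h
      · omega
      · have := hpw.1 0 h
        omega

-- the combinatorial heart of the A-side: A's three-way test ⟺ lst is sorted (for a 0/1 list)
lemma core_iff (lst : List Int) (h01 : ∀ x ∈ lst, x = 0 ∨ x = 1) :
    ((0:Int) ∉ lst ∨ (1:Int) ∉ lst ∨
      ((∀ q ∈ pairsOf lst, ¬ q.2 < q.1) ∧ (∃ q ∈ pairsOf lst, q.1 < q.2)))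
    ↔ lst.Pairwise (fun a b => a ≤ b) := by
  constructor
  · rintro (h | h | ⟨hnd, _⟩)
    · rw [List.pairwise_iff_getElem]
      intro i j hi hj hij
      have hxi := h01 _ (lst.getElem_mem hi)
      have hxj := h01 _ (lst.getElem_mem hj)
      have hni : lst[i] ≠ 0 := fun he => h (he ▸ lst.getElem_mem hi)
      have hnj : lst[j] ≠ 0 := fun he => h (he ▸ lst.getElem_mem hj)
      omega
    · rw [List.pairwise_iff_getElem]
      intro i j hi hj hij
      have hxi := h01 _ (lst.getElem_mem hi)
      have hxj := h01 _ (lst.getElem_mem hj)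
      have hnj : lst[j] ≠ 1 := fun he => h (he ▸ lst.getElem_mem hj)
      have hni : lst[i] ≠ 1 := fun he => h (he ▸ lst.getElem_mem hi)
      omega
    · rw [← List.isChain_iff_pairwise, List.isChain_iff_getElem]
      intro i hi
      have := hnd (lst[i], lst[i+1]) ((mem_pairsOf lst _).mpr ⟨i, hi, rfl⟩)
      omega
  · intro hpw
    by_cases h0 : (0:Int) ∈ lst
    · by_cases h1 : (1:Int) ∈ lst
      · refine Or.inr (Or.inr ⟨?_, exists_up lst h01 hpw h0 h1⟩)
        intro q hq
        obtain ⟨i, hi, hq'⟩ := (mem_pairsOf lst q).mp hq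
        have := (List.pairwise_iff_getElem.mp hpw) i (i+1) (by omega) hi (by omega)
        rw [hq']
        omega
      · exact Or.inr (Or.inl h1)
    · exact Or.inl h0

-- index-free form of A on positive input
theorem A_iff (n : Int) (hn : 0 < n) :
    nicenum n = true ↔ (mkLst (lsbDigits n)).Pairwise (fun a b => a ≤ b) := by
  obtain ⟨p', hloop⟩ := loopA_spec n 0 0 0 0 [] hn
  have hlen : (lsbDigits n).length = (pairsOf (lsbDigits n)).length + 1 := by
    rw [length_pairsOf, lsb_cons n hn]
    simp
  have hup : (cGe (lsbDigits n) + 1 = ((lsbDigits n).length : Int)) ↔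
      (0:Int) ∉ mkLst (lsbDigits n) := by
    rw [mkLst, zero_mem_flat]
    unfold cGe
    constructor
    · rintro hc ⟨q, hq, hlt⟩
      have hcl : List.countP (fun p => decide (p.2 ≤ p.1)) (pairsOf (lsbDigits n)) =
          (pairsOf (lsbDigits n)).length := by omega
      have := List.countP_eq_length.mp hcl q hq
      simp only [decide_eq_true_eq] at this
      omega
    · intro hno
      have hall : ∀ q ∈ pairsOf (lsbDigits n), (fun p : Int × Int => decide (p.2 ≤ p.1)) q = true := by
        intro q hq
        simp only [decide_eq_true_eq]
        by_contra hc
        exact hno ⟨q, hq, by omega⟩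
      rw [List.countP_eq_length.mpr hall]
      omega
  have hdown : (cLe (lsbDigits n) + 1 = ((lsbDigits n).length : Int)) ↔
      (1:Int) ∉ mkLst (lsbDigits n) := by
    rw [mkLst, one_mem_flat]
    unfold cLe
    constructor
    · rintro hc ⟨q, hq, hlt⟩
      have hcl : List.countP (fun p => decide (p.1 ≤ p.2)) (pairsOf (lsbDigits n)) =
          (pairsOf (lsbDigits n)).length := by omega
      have := List.countP_eq_length.mp hcl q hq
      simp only [decide_eq_true_eq] at this
      omega
    · intro hno
      have hall : ∀ q ∈ pairsOf (lsbDigits n), (fun p : Int × Int => decide (p.1 ≤ p.2)) q = true := by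
        intro q hq
        simp only [decide_eq_true_eq]
        by_contra hc
        exact hno ⟨q, hq, by omega⟩
      rw [List.countP_eq_length.mpr hall]
      omega
  have htd : (((List.countP (fun p => decide (p.2 < p.1)) (pairsOf (mkLst (lsbDigits n)))) : Int) = 0) ↔
      (∀ q ∈ pairsOf (mkLst (lsbDigits n)), ¬ q.2 < q.1) := by
    rw [Int.natCast_eq_zero, List.countP_eq_zero]
    simp
  have htu : (((List.countP (fun p => decide (p.1 < p.2)) (pairsOf (mkLst (lsbDigits n)))) : Int) ≠ 0) ↔
      (∃ q ∈ pairsOf (mkLst (lsbDigits n)), q.1 < q.2) := by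
    rw [Ne, Int.natCast_eq_zero, List.countP_eq_zero]
    simp
  have key : ((cGe (lsbDigits n) + 1 = ((lsbDigits n).length : Int)) ∨
      (cLe (lsbDigits n) + 1 = ((lsbDigits n).length : Int)) ∨
      ((((List.countP (fun p => decide (p.2 < p.1)) (pairsOf (mkLst (lsbDigits n)))) : Int) = 0) ∧
       (((List.countP (fun p => decide (p.1 < p.2)) (pairsOf (mkLst (lsbDigits n)))) : Int) ≠ 0)))
      ↔ (mkLst (lsbDigits n)).Pairwise (fun a b => a ≤ b) := by
    rw [hup, hdown, htd, htu]
    exact core_iff _ (flat_h01 _)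
  rw [nicenum]
  simp only [hloop, PySem.List.len_eq, List.nil_append]
  rw [trans_fold (mkLst (lsbDigits n)) 1 0 0 (by norm_num)]
  simp only [Int.toNat_one, Nat.sub_self, List.drop_zero, Int.zero_add]
  split_ifs with hC
  · simp only [true_iff]
    exact key.mp hC
  · simp only [false_iff]
    exact fun hp => hC (key.mpr hp)

-- ===== B-side lemmas =====

-- sortedness of the marker list ⟺ no descending pair before an ascending pair
lemma flat_pairwise_iff (l : List (Int × Int)) :
    (l.flatMap mk1).Pairwise (fun a b => a ≤ b) ↔
    l.Pairwise (fun p q => ¬ (p.2 < p.1 ∧ q.1 < q.2)) := by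
  induction l with
  | nil => simp
  | cons p t ih =>
    rw [List.flatMap_cons, List.pairwise_append, List.pairwise_cons, ih]
    have hone : (mk1 p).Pairwise (fun a b : Int => a ≤ b) := by
      unfold mk1; split_ifs <;> simp
    constructor
    · rintro ⟨_, hpt, hx⟩
      refine ⟨?_, hpt⟩
      rintro q hq ⟨hdp, haq⟩
      have h1 : (1:Int) ∈ mk1 p := (one_mem_mk1 p).mpr hdp
      have h0 : (0:Int) ∈ t.flatMap mk1 := (zero_mem_flat t).mpr ⟨q, hq, haq⟩
      have := hx 1 h1 0 h0
      omega
    · rintro ⟨hS, hpt⟩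
      refine ⟨hone, hpt, ?_⟩
      intro x hx y hy
      rcases mem_mk1 p x hx with hx0 | hx1
      · rcases flat_h01 t y hy with hy0 | hy1 <;> omega
      · rcases flat_h01 t y hy with hy0 | hy1
        · subst hx1 hy0
          have hdp : p.2 < p.1 := (one_mem_mk1 p).mp hx
          obtain ⟨q, hq, haq⟩ := (zero_mem_flat t).mp hy
          exact absurd ⟨hdp, haq⟩ (hS q hq)
        · omega

-- no descending-before-ascending pair ⟺ some split is nondecreasing-then-nonincreasing
lemma split_iff (ds : List Int) :
    (pairsOf ds).Pairwise (fun p q => ¬ (p.2 < p.1 ∧ q.1 < q.2)) ↔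
    ∃ i : Nat, i ≤ ds.length ∧
      (∀ j (hj : j + 1 < ds.length), j + 1 < i → ds[j] ≤ ds[j+1]) ∧
      (∀ j (hj : j + 1 < ds.length), i ≤ j → ds[j+1] ≤ ds[j]) := by
  rw [List.pairwise_iff_getElem]
  constructor
  · intro H
    by_cases hdesc : ∃ j : Nat, j + 1 < ds.length ∧ ds.getD (j+1) 0 < ds.getD j 0
    · refine ⟨Nat.find hdesc + 1, by have := (Nat.find_spec hdesc).1; omega, ?_, ?_⟩
      · intro j hj hji
        have hnot := Nat.find_min hdesc (m := j) (by omega)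
        rw [List.getD_eq_getElem ds 0 (show j + 1 < ds.length by omega),
            List.getD_eq_getElem ds 0 (show j < ds.length by omega)] at hnot
        by_contra hc
        exact hnot ⟨hj, by omega⟩
      · intro j hj hij
        by_contra hc
        push_neg at hc
        have hspec := Nat.find_spec hdesc
        set f := Nat.find hdesc with hfdef
        have hsf : f + 1 < ds.length := hspec.1
        rw [List.getD_eq_getElem ds 0 hsf,
            List.getD_eq_getElem ds 0 (show f < ds.length by omega)] at hspec
        have hflt : f < (pairsOf ds).length := by rw [length_pairsOf]; omega
        have hjlt : j < (pairsOf ds).length := by rw [length_pairsOf]; omega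
        have := H f j hflt hjlt (by omega)
        rw [pairsOf_getElem ds f hflt, pairsOf_getElem ds j hjlt] at this
        exact this ⟨hspec.2, by omega⟩
    · push_neg at hdesc
      refine ⟨ds.length, le_rfl, ?_, ?_⟩
      · intro j hj _
        have := hdesc j hj
        rw [List.getD_eq_getElem ds 0 (show j + 1 < ds.length by omega),
            List.getD_eq_getElem ds 0 (show j < ds.length by omega)] at this
        omega
      · intro j hj hij
        omega
  · rintro ⟨i, hi, hpre, hsuf⟩ p q hp hq hpq
    rw [pairsOf_getElem ds p hp, pairsOf_getElem ds q hq]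
    rw [length_pairsOf] at hp hq
    rintro ⟨hdp, haq⟩
    -- descending pair at p forces i ≤ p + 1; ascending at q forces q < i
    have h1 : ¬ (p + 1 < i) := fun h => absurd (hpre p (by omega) h) (by omega)
    have h2 : ¬ (i ≤ q) := fun h => absurd (hsuf q (by omega) h) (by omega)
    omega

-- the zip-with-tail all over a list, in index form
lemma nondecB_iff (xs : List Int) :
    nondecB xs = true ↔ ∀ j (hj : j + 1 < xs.length), xs[j] ≤ xs[j+1] := by
  rw [nondecB, PySem.List.slice_from_one, List.all_eq_true]
  constructor
  · intro H j hj
    have := H (xs[j], xs[j+1]) ((mem_pairsOf xs _).mpr ⟨j, hj, rfl⟩)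
    simpa using this
  · intro H q hq
    obtain ⟨j, hj, hq'⟩ := (mem_pairsOf xs q).mp hq
    subst hq'
    simpa using H j hj

lemma nonincB_iff (xs : List Int) :
    nonincB xs = true ↔ ∀ j (hj : j + 1 < xs.length), xs[j+1] ≤ xs[j] := by
  rw [nonincB, PySem.List.slice_from_one, List.all_eq_true]
  constructor
  · intro H j hj
    have := H (xs[j], xs[j+1]) ((mem_pairsOf xs _).mpr ⟨j, hj, rfl⟩)
    simpa using this
  · intro H q hq
    obtain ⟨j, hj, hq'⟩ := (mem_pairsOf xs q).mp hq
    subst hq'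
    simpa using H j hj

-- index-free form of B on positive input
theorem B_iff (n : Int) (hn : 0 < n) :
    nicenum_alt n = true ↔ (mkLst (lsbDigits n)).Pairwise (fun a b => a ≤ b) := by
  rw [mkLst, flat_pairwise_iff, split_iff]
  rw [nicenum_alt]
  simp only [digitsLoopB_eq, List.nil_append, List.any_eq_true]
  set ds := lsbDigits n with hds
  constructor
  · rintro ⟨i, hmem, hpred⟩
    rw [PySem.List.mem_pyRange_one] at hmem
    rw [Bool.and_eq_true] at hpred
    obtain ⟨hnd, hni⟩ := hpred
    rw [PySem.List.slice_to ds hmem.1, nondecB_iff] at hnd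
    rw [PySem.List.slice_from ds hmem.1, nonincB_iff] at hni
    refine ⟨i.toNat, by omega, ?_, ?_⟩
    · intro j hj hji
      have hjt : j + 1 < (ds.take i.toNat).length := by
        rw [List.length_take]; omega
      have := hnd j hjt
      simpa using this
    · intro j hj hij
      have hjd : (j - i.toNat) + 1 < (ds.drop i.toNat).length := by
        rw [List.length_drop]; omega
      have := hni (j - i.toNat) hjd
      simp only [List.getElem_drop] at this
      simp only [show i.toNat + (j - i.toNat + 1) = j + 1 from by omega,
                 show i.toNat + (j - i.toNat) = j from by omega] at this
      exact this
  · rintro ⟨i, hi, hpre, hsuf⟩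
    refine ⟨(i : Int), ?_, ?_⟩
    · rw [PySem.List.mem_pyRange_one]
      exact ⟨by positivity, by push_cast; omega⟩
    · rw [Bool.and_eq_true]
      have h0 : (0:Int) ≤ (i:Int) := by positivity
      constructor
      · rw [PySem.List.slice_to ds h0, nondecB_iff]
        intro j hj
        rw [List.length_take, Int.toNat_natCast] at hj
        have hjj : j + 1 < ds.length := by omega
        have := hpre j hjj (by omega)
        simpa using this
      · rw [PySem.List.slice_from ds h0, nonincB_iff]
        intro j hj
        rw [List.length_drop, Int.toNat_natCast] at hj
        simp only [List.getElem_drop, Int.toNat_natCast]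
        exact hsuf (i + j) (by omega) (by omega)

-- ===== VERDICT (by name: the statement is the Claim_ definition above) =====
theorem nicenum_spec : Claim_equal_nicenum := by
  intro n _
  unfold Spec_nicenum
  by_cases hn : 0 < n
  · rw [Bool.eq_iff_iff, A_iff n hn, B_iff n hn]
  · -- loop never entered on both sides: both return true
    rw [nicenum, nicenum_alt]
    rw [nicenumLoopA, dif_neg hn, digitsLoopB, dif_neg hn]
    decide
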